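-- pv_equiv track=rewrite | github.com/pypi-data/pypi-mirror-154 | packages/evolvedominion/evolvedominion-1.0.3-py3-none-any.whl/evolvedominion/display/text.py | _compute_n_columns
-- ===== SOURCE A (Python) =====
-- def _compute_n_columns(list_of_strings, width, col_width, gap_size):
--     """ Return the maximum number of columns given the constraints. """
--     n_cols, n_residual = divmod(width, col_width)
--     if (n_cols > 1):
--         n_gaps = n_cols - 1
--         n_padding = n_gaps * gap_size
--         while (n_padding > n_residual):
--             n_cols = n_cols - 1
--             n_gaps = n_cols - 1
--             n_padding = n_gaps * gap_size
--             n_residual = n_residual + col_width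
--     return n_cols
-- ===== SOURCE B (Python) =====
-- def _compute_n_columns(list_of_strings, width, col_width, gap_size):
--     """ Return the maximum number of columns given the constraints (closed form). """
--     n_cols, n_residual = divmod(width, col_width)
--     if n_cols <= 1:
--         return n_cols
--     deficit = (n_cols - 1) * gap_size - n_residual
--     if deficit <= 0:
--         return n_cols
--     # Each removed column frees col_width of residual and gap_size of padding,
--     # so the number of columns to drop is ceil(deficit / (gap_size + col_width)).
--     return n_cols - -(-deficit // (gap_size + col_width))
-- ===== Notes on version B (the rewrite author's own statement) =====
-- stated objective: alternative
-- what changed: Replaces A's decrement-one-column-at-a-time while loop by a closed-form ceiling division computing how many columns to drop.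
import Mathlib
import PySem

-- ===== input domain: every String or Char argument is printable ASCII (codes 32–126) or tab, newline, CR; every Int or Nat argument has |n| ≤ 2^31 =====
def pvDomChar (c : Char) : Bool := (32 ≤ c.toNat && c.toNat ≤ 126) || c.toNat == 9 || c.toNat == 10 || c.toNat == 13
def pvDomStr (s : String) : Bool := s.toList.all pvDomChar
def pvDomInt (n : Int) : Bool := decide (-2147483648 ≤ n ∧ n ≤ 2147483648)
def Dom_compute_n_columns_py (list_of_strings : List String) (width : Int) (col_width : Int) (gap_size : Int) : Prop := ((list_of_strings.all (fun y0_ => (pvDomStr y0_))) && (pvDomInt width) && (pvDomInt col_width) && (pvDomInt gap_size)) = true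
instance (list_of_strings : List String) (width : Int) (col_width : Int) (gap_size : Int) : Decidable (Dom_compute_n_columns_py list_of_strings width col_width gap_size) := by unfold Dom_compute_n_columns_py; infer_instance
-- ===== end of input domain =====

-- B replaces A's one-column-at-a-time while loop by a closed-form ceiling division.

-- ===== PORT A =====
-- A's while loop: 'while (n_cols-1)*gap_size > n_residual: n_cols -= 1; n_residual += col_width'
-- (n_gaps/n_padding are recomputed from n_cols each iteration, so they are inlined into the test).
-- The fuel ((n_cols-1)*gap_size - n_residual).toNat + 1 only makes the recursion total; on every
-- input admitted by Pre_ it is at least the number of iterations the Python loop performs.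
def pyLoopA (fuel : Nat) (n_cols n_residual col_width gap_size : Int) : Int :=
  match fuel with
  | 0 => n_cols
  | f + 1 =>
    if (n_cols - 1) * gap_size > n_residual then
      pyLoopA f (n_cols - 1) (n_residual + col_width) col_width gap_size
    else n_cols

def compute_n_columns_py (list_of_strings : List String) (width : Int) (col_width : Int) (gap_size : Int) : Int :=
  match PySem.Int.divmod? width col_width with
  | none => 0   -- Python raises ZeroDivisionError here; excluded by Pre_
  | some (n_cols, n_residual) =>
    if n_cols > 1 then
      pyLoopA (((n_cols - 1) * gap_size - n_residual).toNat + 1) n_cols n_residual col_width gap_size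
    else n_cols

-- ===== PORT B =====
def compute_n_columns_py_alt (list_of_strings : List String) (width : Int) (col_width : Int) (gap_size : Int) : Int :=
  match PySem.Int.divmod? width col_width with
  | none => 0   -- Python raises ZeroDivisionError here; excluded by Pre_
  | some (n_cols, n_residual) =>
    if n_cols ≤ 1 then n_cols
    else  -- deficit := (n_cols - 1) * gap_size - n_residual, inlined
      if (n_cols - 1) * gap_size - n_residual ≤ 0 then n_cols
      else n_cols - (-(PySem.Int.floordiv (-((n_cols - 1) * gap_size - n_residual)) (gap_size + col_width)))

-- ===== PRECONDITION & SPEC =====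
-- Pre_ excludes col_width = 0, where A raises ZeroDivisionError, and the inputs (col_width < 0,
-- gap_size + col_width ≤ 0, with the loop entered) on which A's while loop never terminates;
-- it admits every input on which A returns.
def Pre_compute_n_columns_py (list_of_strings : List String) (width : Int) (col_width : Int) (gap_size : Int) : Prop :=
  col_width ≠ 0 ∧
    (0 < col_width ∨ 0 < gap_size + col_width ∨ PySem.Int.floordiv width col_width ≤ 1 ∨
      (PySem.Int.floordiv width col_width - 1) * gap_size ≤ PySem.Int.mod width col_width)
instance (list_of_strings : List String) (width : Int) (col_width : Int) (gap_size : Int) : Decidable (Pre_compute_n_columns_py list_of_strings width col_width gap_size) := by unfold Pre_compute_n_columns_py; infer_instance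

def pvWitness_compute_n_columns_py : List String × Int × Int × Int := (["alpha", "beta"], 80, 10, 3)

def Spec_compute_n_columns_py (list_of_strings : List String) (width : Int) (col_width : Int) (gap_size : Int) (out : Int) : Prop := out = compute_n_columns_py_alt list_of_strings width col_width gap_size
instance (list_of_strings : List String) (width : Int) (col_width : Int) (gap_size : Int) (out : Int) : Decidable (Spec_compute_n_columns_py list_of_strings width col_width gap_size out) := by unfold Spec_compute_n_columns_py; infer_instance

-- ===== CLAIM (what is proved, stated in full; the proofs are below) =====
def Claim_equal_compute_n_columns_py : Prop := ∀ (list_of_strings : List String) (width : Int) (col_width : Int) (gap_size : Int), Dom_compute_n_columns_py list_of_strings width col_width gap_size → Pre_compute_n_columns_py list_of_strings width col_width gap_size → Spec_compute_n_columns_py list_of_strings width col_width gap_size (compute_n_columns_py list_of_strings width col_width gap_size)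

-- ===== LEMMAS AND PROOFS =====

-- If the loop test already fails, pyLoopA returns its current n_cols regardless of fuel.
lemma pyLoopA_done (fuel : Nat) (n r c g : Int) (h : (n - 1) * g - r ≤ 0) :
    pyLoopA fuel n r c g = n := by
  cases fuel with
  | zero => rfl
  | succ f => simp only [pyLoopA]; rw [if_neg]; omega

-- Closed form of the loop: with a positive step g + c, a positive initial deficit d and
-- enough fuel, the loop drops exactly ⌈d / (g + c)⌉ columns.
lemma pyLoopA_closed : ∀ (fuel : Nat) (n r c g : Int), 0 < g + c →
    0 < (n - 1) * g - r → (n - 1) * g - r ≤ (fuel : Int) →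
    pyLoopA fuel n r c g = n - (-(PySem.Int.floordiv (-((n - 1) * g - r)) (g + c))) := by
  intro fuel
  induction fuel with
  | zero => intro n r c g hstep hd hfuel; omega
  | succ f ih =>
    intro n r c g hstep hd hfuel
    have hcond : (n - 1) * g > r := by omega
    simp only [pyLoopA]
    rw [if_pos hcond]
    set d : Int := (n - 1) * g - r with hd_def
    have hd' : (n - 1 - 1) * g - (r + c) = d - (g + c) := by ring
    by_cases hle : d - (g + c) ≤ 0
    · rw [pyLoopA_done f _ _ _ _ (by rw [hd']; exact hle)]
      have : -(PySem.Int.floordiv (-d) (g + c)) = 1 := by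
        rw [PySem.Int.neg_floordiv_neg_eq_iff_of_pos hstep]
        constructor <;> nlinarith
      omega
    · push_neg at hle
      rw [ih (n - 1) (r + c) c g hstep (by omega) (by omega)]
      set q : Int := -(PySem.Int.floordiv (-((n - 1 - 1) * g - (r + c))) (g + c)) with hq_def
      have hbr : (q - 1) * (g + c) < (n - 1 - 1) * g - (r + c) ∧
          (n - 1 - 1) * g - (r + c) ≤ q * (g + c) :=
        (PySem.Int.neg_floordiv_neg_eq_iff_of_pos hstep).mp hq_def.symm
      have : -(PySem.Int.floordiv (-d) (g + c)) = q + 1 := by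
        rw [PySem.Int.neg_floordiv_neg_eq_iff_of_pos hstep]
        constructor <;> nlinarith [hbr.1, hbr.2]
      omega

theorem compute_n_columns_py_spec_aux (list_of_strings : List String) (width : Int)
    (col_width : Int) (gap_size : Int)
    (hpre : Pre_compute_n_columns_py list_of_strings width col_width gap_size) :
    compute_n_columns_py list_of_strings width col_width gap_size
      = compute_n_columns_py_alt list_of_strings width col_width gap_size := by
  obtain ⟨hc, hdisj⟩ := hpre
  have hdm : PySem.Int.divmod? width col_width
      = some (PySem.Int.floordiv width col_width, PySem.Int.mod width col_width) := by
    simp [PySem.Int.divmod?, PySem.Int.floordiv, PySem.Int.mod, hc]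
  simp only [compute_n_columns_py, compute_n_columns_py_alt, hdm]
  set n : Int := PySem.Int.floordiv width col_width with hn
  set r : Int := PySem.Int.mod width col_width with hr
  by_cases h1 : n > 1
  · rw [if_pos h1, if_neg (by omega)]
    set d : Int := (n - 1) * gap_size - r with hd
    by_cases h2 : d ≤ 0
    · rw [pyLoopA_done _ _ _ _ _ h2, if_pos h2]
    · push_neg at h2
      have hstep : 0 < gap_size + col_width := by
        rcases hdisj with hcw | hs | hle | hpad
        · have hrn : 0 ≤ r := PySem.Int.mod_nonneg width hcw
          have hg : 0 < gap_size := by nlinarith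
          omega
        · exact hs
        · omega
        · omega
      rw [pyLoopA_closed _ _ _ _ _ hstep h2 (by
          have := Int.self_le_toNat d
          push_cast
          omega)]
      rw [if_neg (by omega : ¬ d ≤ 0)]
  · rw [if_neg h1, if_pos (by omega)]

-- ===== VERDICT (by name: the statement is the Claim_ definition above) =====
theorem compute_n_columns_py_spec : Claim_equal_compute_n_columns_py := by
  intro list_of_strings width col_width gap_size _ hpre
  exact compute_n_columns_py_spec_aux list_of_strings width col_width gap_size hpre
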